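/- GENERATED by mk_final_copies.py from the proof of the farm's unit `decode_all.7` (farm:decode_all.7.1: Proof.lean) as the
   re-elaboration sweep compiled it — do not edit. -/
import Asan.CheckWalk
import Vorbis.Spec.Units.decode_all_7

/- SEGMENT 7 OF decode_all (the single epilogue 10351DH … `ret`, 10 instructions), in the farm's format: THE EPILOGUE OF A PROTECTED
   FRAME, after farm/worked/stb_vorbis_get_frame_float.6 (farm/hints/protected_frame.md). The shadow index in r13 is named as a number
   `sb` WITH LINEAR BOUNDS before the walk; the six pops and the return address are read THROUGH the two inline shadow stores
   (`seg7_read_through`); afterwards the two stores are `storesMem … Frames.decode_all.epilogue` (`da7_epilogue_inv`), the fixed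
   objects are live for the callers' frame list again (`da_fixedLive_reframe`). rax is not written: its bounds are the assertion's. -/
open X86 X86.User Asan Vorbis Vorbis.Spec

set_option maxRecDepth 4000
set_option maxHeartbeats 4000000

namespace Vorbis.Spec.decode_all_7

/-- The shadow index of the frame's base as a number: `(sp − 184) >> 3 = sb` when `8 · sb = sp − 184`. Stated apart: in a context
without disjunctions `u_omega` does the shift. -/
theorem seg7_granule (sp : Word) (sb : Nat) (hsb : 8 * sb = sp.toNat - 184) (hlo : 0x700000 + 6448 ≤ sp.toNat)
    (hhi : sp.toNat + 8 ≤ 0x800000) : (sp - 184) >>> 3 = UInt64.ofNat sb := by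
  apply UInt64.toNat_inj.mp
  u_omega

/-- **A read below the shadow region goes through the epilogue's two shadow stores** (`Mem.readLE_writeLE_disjoint_noWrap` twice; the
walker's own load resolution does not do it). Both stores are 8 bytes wide here. -/
theorem seg7_read_through (m : Mem) (sb : Nat) (b : Word) (k : Nat) (hsb1 : 0xE0000 + 700 ≤ sb) (hsb2 : sb + 24 ≤ 0x100000)
    (hb : b.toNat + k ≤ 0xC00000) :
    ((m.writeLE (UInt64.ofNat sb + 12582912) 8 0).writeLE (UInt64.ofNat sb + 12582920) 8 0).readLE b k = m.readLE b k := by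
  have e0 : (UInt64.ofNat sb + 12582912).toNat = sb + 12582912 := by u_omega
  have e8 : (UInt64.ofNat sb + 12582920).toNat = sb + 12582920 := by u_omega
  rw [Mem.readLE_writeLE_disjoint_noWrap _ _ _ _ _ _ (by unfold Mem.NoWrap; omega) (by unfold Mem.NoWrap; omega) (by omega),
    Mem.readLE_writeLE_disjoint_noWrap _ _ _ _ _ _ (by unfold Mem.NoWrap; omega) (by unfold Mem.NoWrap; omega) (by omega)]

/-- **The shadow layer after the epilogue's two shadow stores, in the walker's form of the memory**: the callers' frame list again,
the clean stack ending at the entry `rsp + 8` (`da_shadow_epilogue`; the two stores are `Frames.decode_all.epilogue`). -/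
theorem da7_epilogue_inv {others' : List Obj} {frames : List (Nat × FrameLayout)} {m : Mem} {sp : Word} {top' : Nat}
    (hinv : ShadowInv others' ((sp.toNat - 184, Vorbis.Frames.decode_all) :: frames) top' m) (h8 : sp.toNat % 8 = 0)
    (hlo : 184 ≤ sp.toNat) (hhi : sp.toNat + 8 ≤ 0x800000)
    (hfr : ∀ bF, bF ∈ frames → sp.toNat + 8 ≤ bF.1) :
    ShadowInv others' frames (sp.toNat + 8)
      ((m.writeLE ((sp - 184) >>> 3 + 12582912) 8 0).writeLE ((sp - 184) >>> 3 + 12582920) 8 0) := by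
  have a0 := decode_all.da_shadow_addr_eq sp 12582912 0 hlo (by decide)
  have a8 := decode_all.da_shadow_addr_eq sp 12582920 8 hlo (by decide)
  have es : storesMem m ((sp.toNat - 184) / 8) Vorbis.Frames.decode_all.epilogue =
      (m.writeLE ((sp - 184) >>> 3 + 12582912) 8 0).writeLE ((sp - 184) >>> 3 + 12582920) 8 0 := by
    simp only [storesMem, Vorbis.Frames.decode_all, List.foldl]
    rw [a0, a8]
  refine decode_all.da_shadow_epilogue hinv ?_ h8 hhi hfr
  rw [es]
  exact Mem.EqOn.refl _ _ _

end Vorbis.Spec.decode_all_7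

open Vorbis.Spec.decode_all_7

/-- **Segment 7**: from the epilogue's head (`AtEpi`) to the contract's `Returned`. -/
theorem Vorbis.Spec.Worked.decode_all_7_ok : Vorbis.Spec.decode_all_7.Statement := by
  intro Lay hLay μ hμ u₀ hcode others frames len u ret others' v hat
  -- the entry state's facts, from the assertion
  have he := hat.frame.entry
  have hpre := hat.frame.pre
  v_entry he
  obtain ⟨hsh, _, _, hlen, _⟩ := hpre
  have hfr := decode_all.da_frames_above hsh.inv
  obtain ⟨j_rip, hfrm, j_r13, hrlo, hrhi⟩ := hat
  obtain ⟨_, _, j_rsp, hs15, hs14, hs13, hs12, hsbp, hsbx, hs0, _, hsame, j_code, j_inv, hinv, hfix, hoff⟩ := hfrm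
  -- THE GRANULE AS A NUMBER WITH LINEAR BOUNDS (no `>>> 3`, no `/ 8` in the walk's context)
  obtain ⟨sb, hsb⟩ : ∃ sb : Nat, 8 * sb = (u.reg .rsp).toNat - 184 := ⟨((u.reg .rsp).toNat - 184) / 8, by omega⟩
  have hgr := seg7_granule (u.reg .rsp) sb hsb he_room he_top
  rw [hgr] at j_r13
  have hsb1 : 0xE0000 + 700 ≤ sb := by omega
  have hsb2 : sb + 24 ≤ 0x100000 := by omega
  have w_rip := j_rip
  have w_eq := Vorbis.conv_code_eqOn j_code
  have hdf : v.flags .df = false := (show X86.User.abiInv _ from j_inv).1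
  have hmx : v.mxcsr &&& 0x1F80 = 0x1F80 := (show X86.User.abiInv _ from j_inv).2
  have w_kept : RegsKept [.rsp] v v := RegsKept.refl _ _
  u_walk hcode [hμ.vendor] span [Vorbis.L.textLo, Vorbis.L.textHi] side (v_side)
  · -- the `ret`: the return address, read through the two shadow stores, is canonical
    rw [seg7_read_through v.mem sb (u.reg .rsp) 8 hsb1 hsb2 (by omega), hs0]
    exact he_ret_lt
  · refine ReachVia.done ?_
    -- the six pops and the return address, read through the two shadow stores
    rw [seg7_read_through v.mem sb (u.reg .rsp) 8 hsb1 hsb2 (by omega), hs0] at w_rip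
    rw [seg7_read_through v.mem sb (u.reg .rsp - 8) 8 hsb1 hsb2 (by u_omega), hs15] at w_r15
    rw [seg7_read_through v.mem sb (u.reg .rsp - 16) 8 hsb1 hsb2 (by u_omega), hs14] at w_r14
    rw [seg7_read_through v.mem sb (u.reg .rsp - 24) 8 hsb1 hsb2 (by u_omega), hs13] at w_r13
    rw [seg7_read_through v.mem sb (u.reg .rsp - 32) 8 hsb1 hsb2 (by u_omega), hs12] at w_r12
    rw [seg7_read_through v.mem sb (u.reg .rsp - 40) 8 hsb1 hsb2 (by u_omega), hsbp] at w_rbp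
    rw [seg7_read_through v.mem sb (u.reg .rsp - 48) 8 hsb1 hsb2 (by u_omega), hsbx] at w_rbx
    -- the shadow layer of the callers' list again: the two stores are the frame's epilogue
    have hinvR : ShadowInv others' frames ((u.reg .rsp).toNat + 8) s_103544.mem := by
      rw [w_mem, ← hgr]
      exact da7_epilogue_inv hinv he_align (by omega) he_top hfr
    -- the fixed objects are live under the callers' list
    have hfixR : Top.FixedLive len others' frames := decode_all.da_fixedLive_reframe hfix hinv hlen
    have e_rsp : (s_103544.reg .rsp).toNat = (u.reg .rsp).toNat + 8 := by
      rw [w_rsp]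
      u_omega
    v_returned
    · show (∃ o, _) ∧ _ ∧ _
      rw [e_rsp, w_kept .rax rfl]
      exact ⟨⟨others', hinvR, hfixR, hoff⟩, hrlo, hrhi⟩
    · intro q hq
      cases q <;> first
        | (exact absurd hq (by decide))
        | (with_reducible assumption)
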